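-- pv_equiv track=rewrite | github.com/MohamedCuerci/desafios-uri-1000-1004 | uri3342.py | cria_tabuleiro
-- ===== SOURCE A (Python) =====
-- def cria_tabuleiro(tamanho):
--     contador = 0
--     par = 0
--     impar = 0
--     for linha in range(tamanho):
--         for coluna in range(tamanho):
--             contador += 1
--             if contador % 2 == 0:
--                 par += 1
--             else:
--                 impar += 1
--
--     return impar, par
-- ===== SOURCE B (Python) =====
-- def cria_tabuleiro(tamanho):
--     total = tamanho * tamanho if tamanho > 0 else 0
--     par = total // 2
--     return total - par, par
-- ===== Notes on version B (the rewrite author's own statement) =====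
-- stated objective: faster
-- what changed: Replaces the quadratic double counting loop with a closed form: the square of the size is the cell total, the even half is an integer halving of it, the odd count is the remainder.
import Mathlib
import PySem

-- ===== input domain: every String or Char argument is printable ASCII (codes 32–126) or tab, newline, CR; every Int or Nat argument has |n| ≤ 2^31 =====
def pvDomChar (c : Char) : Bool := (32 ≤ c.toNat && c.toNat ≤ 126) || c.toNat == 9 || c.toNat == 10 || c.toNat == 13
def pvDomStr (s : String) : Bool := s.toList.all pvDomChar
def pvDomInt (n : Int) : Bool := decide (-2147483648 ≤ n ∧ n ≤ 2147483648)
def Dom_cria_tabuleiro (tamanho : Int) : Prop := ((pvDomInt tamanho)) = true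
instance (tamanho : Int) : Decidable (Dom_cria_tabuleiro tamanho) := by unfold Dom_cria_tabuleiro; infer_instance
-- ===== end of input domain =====

-- B replaces A's O(n^2) double counting loop with the closed form total = n^2, par = total//2, impar = total - par.


-- ===== PORT A =====
-- state is (contador, par, impar); one body iteration of A's inner loop
def criaStep (st : Int × Int × Int) : Int × Int × Int :=
  if PySem.Int.mod (st.1 + 1) 2 = 0 then (st.1 + 1, st.2.1 + 1, st.2.2)
  else (st.1 + 1, st.2.1, st.2.2 + 1)

def cria_tabuleiro (tamanho : Int) : List Int :=
  let s := (PySem.List.pyRange 0 tamanho 1).foldl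
    (fun st _linha => (PySem.List.pyRange 0 tamanho 1).foldl (fun st2 _coluna => criaStep st2) st)
    ((0 : Int), (0 : Int), (0 : Int))
  [s.2.2, s.2.1]

-- ===== PORT B =====
def cria_tabuleiro_alt (tamanho : Int) : List Int :=
  let total := if tamanho > 0 then tamanho * tamanho else 0
  let par := PySem.Int.floordiv total 2
  [total - par, par]

-- ===== PRECONDITION & SPEC =====
def Spec_cria_tabuleiro (tamanho : Int) (out : List Int) : Prop := out = cria_tabuleiro_alt tamanho
instance (tamanho : Int) (out : List Int) : Decidable (Spec_cria_tabuleiro tamanho out) := by unfold Spec_cria_tabuleiro; infer_instance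

-- ===== CLAIM (what is proved, stated in full; the proofs are below) =====
def Claim_equal_cria_tabuleiro : Prop := ∀ (tamanho : Int), Dom_cria_tabuleiro tamanho → Spec_cria_tabuleiro tamanho (cria_tabuleiro tamanho)

-- ===== LEMMAS AND PROOFS =====

-- congruence for the invariant state shape
lemma triInv (a b : Int) (h : a = b) :
    ((a, PySem.Int.floordiv a 2, a - PySem.Int.floordiv a 2) : Int × Int × Int)
      = (b, PySem.Int.floordiv b 2, b - PySem.Int.floordiv b 2) := by rw [h]

lemma triOut (a b : Int) (h : a = b) :
    ([a - PySem.Int.floordiv a 2, PySem.Int.floordiv a 2] : List Int)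
      = [b - PySem.Int.floordiv b 2, PySem.Int.floordiv b 2] := by rw [h]

-- one step advances the invariant state (c, c//2, c - c//2)
lemma criaStep_inv (c : Int) :
    criaStep (c, PySem.Int.floordiv c 2, c - PySem.Int.floordiv c 2)
      = (c + 1, PySem.Int.floordiv (c + 1) 2, (c + 1) - PySem.Int.floordiv (c + 1) 2) := by
  have e1 : PySem.Int.mod (c + 1) 2 = (c + 1) % 2 :=
    PySem.Int.mod_eq_emod_of_pos (by omega : (0:Int) < 2)
  have e2 : PySem.Int.floordiv (c + 1) 2 = (c + 1) / 2 :=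
    PySem.Int.floordiv_eq_ediv_of_pos (by omega : (0:Int) < 2)
  have e3 : PySem.Int.floordiv c 2 = c / 2 :=
    PySem.Int.floordiv_eq_ediv_of_pos (by omega : (0:Int) < 2)
  show (if PySem.Int.mod (c + 1) 2 = 0
      then ((c + 1, PySem.Int.floordiv c 2 + 1, c - PySem.Int.floordiv c 2) : Int × Int × Int)
      else (c + 1, PySem.Int.floordiv c 2, c - PySem.Int.floordiv c 2 + 1))
    = (c + 1, PySem.Int.floordiv (c + 1) 2, (c + 1) - PySem.Int.floordiv (c + 1) 2)
  rw [e1, e2, e3]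
  split_ifs with h
  all_goals simp only [Prod.mk.injEq, true_and]
  all_goals exact ⟨by omega, by omega⟩

-- folding the step over any list advances the counter by the list length
lemma foldl_criaStep (l : List Int) (c : Int) :
    l.foldl (fun st _ => criaStep st) (c, PySem.Int.floordiv c 2, c - PySem.Int.floordiv c 2)
      = (c + l.length, PySem.Int.floordiv (c + l.length) 2,
         (c + l.length) - PySem.Int.floordiv (c + l.length) 2) := by
  induction l generalizing c with
  | nil => simp
  | cons x xs ih =>
    simp only [List.foldl_cons, criaStep_inv c]
    rw [ih (c + 1)]
    exact triInv _ _ (by simp only [List.length_cons]; push_cast; ring)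

-- the outer fold: after all rows the counter is rows * columns
lemma foldl_outer (outer : List Int) (inner : List Int) (c : Int) :
    outer.foldl (fun st _ => inner.foldl (fun st2 _ => criaStep st2) st)
      (c, PySem.Int.floordiv c 2, c - PySem.Int.floordiv c 2)
      = (c + outer.length * inner.length,
         PySem.Int.floordiv (c + outer.length * inner.length) 2,
         (c + outer.length * inner.length) - PySem.Int.floordiv (c + outer.length * inner.length) 2) := by
  induction outer generalizing c with
  | nil => simp
  | cons x xs ih =>
    simp only [List.foldl_cons]
    rw [foldl_criaStep inner c, ih (c + inner.length)]
    exact triInv _ _ (by simp only [List.length_cons]; push_cast; ring)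

-- ===== VERDICT (by name: the statement is the Claim_ definition above) =====
theorem cria_tabuleiro_spec : Claim_equal_cria_tabuleiro := by
  intro n _
  show cria_tabuleiro n = cria_tabuleiro_alt n
  unfold cria_tabuleiro cria_tabuleiro_alt
  have h00 : ((0:Int), (0:Int), (0:Int))
      = ((0:Int), PySem.Int.floordiv 0 2, 0 - PySem.Int.floordiv 0 2) := by decide
  rw [h00, foldl_outer (PySem.List.pyRange 0 n 1) (PySem.List.pyRange 0 n 1) 0]
  apply triOut
  simp only [PySem.List.length_pyRange_one, zero_add]
  split_ifs with h
  · have hn : (((n - 0).toNat : Int)) = n := by omega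
    rw [hn]
  · have hn : ((n - 0).toNat) = 0 := by omega
    rw [hn]; simp
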